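-- pv_equiv track=rewrite | github.com/timothyjrainwater-lab/The-Table | aidm/core/skill_resolver.py | _get_synergy_bonus
-- ===== SOURCE A (Python) =====
-- _SKILL_SYNERGIES: dict = {
--     # source_skill: [(target_skill, bonus), ...]
--     "bluff":                    [("disguise", 2), ("diplomacy", 2), ("intimidate", 2), ("sleight_of_hand", 2)],
--     "escape_artist":            [("use_rope", 2)],
--     "handle_animal":            [("ride", 2), ("wild_empathy", 2)],
--     "jump":                     [("tumble", 2)],
--     "knowledge_arcana":         [("spellcraft", 2)],
--     "knowledge_architecture":   [("search", 2)],
--     "knowledge_dungeoneering":  [("survival", 2)],   # underground only — FINDING-ENGINE-SYNERGY-CONTEXT-001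
--     "knowledge_geography":      [("survival", 2), ("navigate", 2)],
--     "knowledge_history":        [("bardic_knowledge", 2)],
--     "knowledge_local":          [("gather_information", 2)],
--     "knowledge_nature":         [("survival", 2), ("handle_animal", 2)],
--     "knowledge_nobility":       [("diplomacy", 2)],
--     "knowledge_planes":         [("survival", 2)],   # other planes only — FINDING-ENGINE-SYNERGY-CONTEXT-001
--     "knowledge_religion":       [("turn_undead", 2)],
--     "search":                   [("survival", 2)],   # tracking only — FINDING-ENGINE-SYNERGY-CONTEXT-001
--     "sense_motive":             [("diplomacy", 2)],
--     "spellcraft":               [("use_magic_device", 2)],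
--     "survival":                 [("knowledge_nature", 2)],
--     "tumble":                   [("balance", 2), ("jump", 2)],
--     "use_magic_device":         [("spellcraft", 2)],
--     "use_rope":                 [("climb", 2), ("escape_artist", 2)],
-- }
--
-- def _get_synergy_bonus(actor_ranks: dict, target_skill_id: str) -> int:
--     """Sum all applicable synergy bonuses for target_skill_id.
--
--     Args:
--         actor_ranks: dict mapping skill_id → rank count (EF.SKILL_RANKS)
--         target_skill_id: The skill being checked
--
--     Returns:
--         Total synergy bonus from all qualifying source skills (PHB p.65)
--     """
--     total = 0
--     for source_skill, targets in _SKILL_SYNERGIES.items():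
--         if actor_ranks.get(source_skill, 0) >= 5:
--             for target, bonus in targets:
--                 if target == target_skill_id:
--                     total += bonus
--     return total
-- ===== SOURCE B (Python) =====
-- # Reverse-synergy index: target_skill -> [(source_skill, bonus), ...]
-- # (precomputed inverse of the PHB synergy table, so the lookup is by target)
-- _REVERSE_SYNERGIES: dict = {
--     "disguise":           [("bluff", 2)],
--     "diplomacy":          [("bluff", 2), ("knowledge_nobility", 2), ("sense_motive", 2)],
--     "intimidate":         [("bluff", 2)],
--     "sleight_of_hand":    [("bluff", 2)],
--     "use_rope":           [("escape_artist", 2)],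
--     "ride":               [("handle_animal", 2)],
--     "wild_empathy":       [("handle_animal", 2)],
--     "tumble":             [("jump", 2)],
--     "spellcraft":         [("knowledge_arcana", 2), ("use_magic_device", 2)],
--     "search":             [("knowledge_architecture", 2)],
--     "survival":           [("knowledge_dungeoneering", 2), ("knowledge_geography", 2),
--                            ("knowledge_nature", 2), ("knowledge_planes", 2), ("search", 2)],
--     "navigate":           [("knowledge_geography", 2)],
--     "bardic_knowledge":   [("knowledge_history", 2)],
--     "gather_information": [("knowledge_local", 2)],
--     "handle_animal":      [("knowledge_nature", 2)],
--     "turn_undead":        [("knowledge_religion", 2)],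
--     "knowledge_nature":   [("survival", 2)],
--     "balance":            [("tumble", 2)],
--     "jump":               [("tumble", 2)],
--     "use_magic_device":   [("spellcraft", 2)],
--     "climb":              [("use_rope", 2)],
--     "escape_artist":      [("use_rope", 2)],
-- }
--
-- def _get_synergy_bonus(actor_ranks: dict, target_skill_id: str) -> int:
--     return sum(bonus
--                for source, bonus in _REVERSE_SYNERGIES.get(target_skill_id, [])
--                if actor_ranks.get(source, 0) >= 5)
-- ===== Notes on version B (the rewrite author's own statement) =====
-- stated objective: simpler
-- what changed: Replaces the scan over every source skill's target list with a precomputed reverse index keyed by target skill: one lookup of target_skill_id, then a sum over only the relevant (source, bonus) pairs.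
import Mathlib
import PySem

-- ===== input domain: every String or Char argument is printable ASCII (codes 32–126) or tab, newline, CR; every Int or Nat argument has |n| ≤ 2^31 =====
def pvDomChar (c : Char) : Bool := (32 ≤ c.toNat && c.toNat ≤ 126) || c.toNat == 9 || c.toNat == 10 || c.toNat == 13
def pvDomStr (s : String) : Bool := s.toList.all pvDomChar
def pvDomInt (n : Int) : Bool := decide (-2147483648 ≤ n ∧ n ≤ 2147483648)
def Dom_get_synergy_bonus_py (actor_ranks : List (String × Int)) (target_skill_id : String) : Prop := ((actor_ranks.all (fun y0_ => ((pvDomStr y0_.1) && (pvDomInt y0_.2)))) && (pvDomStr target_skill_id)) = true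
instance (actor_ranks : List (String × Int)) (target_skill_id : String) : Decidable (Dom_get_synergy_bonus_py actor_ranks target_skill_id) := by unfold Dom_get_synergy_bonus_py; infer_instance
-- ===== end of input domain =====

-- B replaces A's scan of every source skill's target list by a single lookup in a
-- precomputed reverse index keyed by the target skill (objective: simpler).

-- actor_ranks.get(k, 0): first-match lookup in the association list (Python dict.get)
def pvRankGet (d : List (String × Int)) (k : String) : Int :=
  match d with
  | [] => 0
  | p :: rest => if p.1 == k then p.2 else pvRankGet rest k

-- ===== PORT A =====
-- the module constant _SKILL_SYNERGIES, in dict insertion order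
def pvSynTable : List (String × List (String × Int)) :=
  [ ("bluff", [("disguise", 2), ("diplomacy", 2), ("intimidate", 2), ("sleight_of_hand", 2)]),
    ("escape_artist", [("use_rope", 2)]),
    ("handle_animal", [("ride", 2), ("wild_empathy", 2)]),
    ("jump", [("tumble", 2)]),
    ("knowledge_arcana", [("spellcraft", 2)]),
    ("knowledge_architecture", [("search", 2)]),
    ("knowledge_dungeoneering", [("survival", 2)]),
    ("knowledge_geography", [("survival", 2), ("navigate", 2)]),
    ("knowledge_history", [("bardic_knowledge", 2)]),
    ("knowledge_local", [("gather_information", 2)]),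
    ("knowledge_nature", [("survival", 2), ("handle_animal", 2)]),
    ("knowledge_nobility", [("diplomacy", 2)]),
    ("knowledge_planes", [("survival", 2)]),
    ("knowledge_religion", [("turn_undead", 2)]),
    ("search", [("survival", 2)]),
    ("sense_motive", [("diplomacy", 2)]),
    ("spellcraft", [("use_magic_device", 2)]),
    ("survival", [("knowledge_nature", 2)]),
    ("tumble", [("balance", 2), ("jump", 2)]),
    ("use_magic_device", [("spellcraft", 2)]),
    ("use_rope", [("climb", 2), ("escape_artist", 2)]) ]

def get_synergy_bonus_py (actor_ranks : List (String × Int)) (target_skill_id : String) : Int :=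
  pvSynTable.foldl (fun total p =>
    if 5 ≤ pvRankGet actor_ranks p.1 then
      p.2.foldl (fun t q => if q.1 == target_skill_id then t + q.2 else t) total
    else total) 0

-- ===== PORT B =====
-- the module constant _REVERSE_SYNERGIES from Source B: target_skill -> [(source_skill, bonus)]
def pvRevTable : List (String × List (String × Int)) :=
  [ ("disguise", [("bluff", 2)]),
    ("diplomacy", [("bluff", 2), ("knowledge_nobility", 2), ("sense_motive", 2)]),
    ("intimidate", [("bluff", 2)]),
    ("sleight_of_hand", [("bluff", 2)]),
    ("use_rope", [("escape_artist", 2)]),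
    ("ride", [("handle_animal", 2)]),
    ("wild_empathy", [("handle_animal", 2)]),
    ("tumble", [("jump", 2)]),
    ("spellcraft", [("knowledge_arcana", 2), ("use_magic_device", 2)]),
    ("search", [("knowledge_architecture", 2)]),
    ("survival", [("knowledge_dungeoneering", 2), ("knowledge_geography", 2),
                  ("knowledge_nature", 2), ("knowledge_planes", 2), ("search", 2)]),
    ("navigate", [("knowledge_geography", 2)]),
    ("bardic_knowledge", [("knowledge_history", 2)]),
    ("gather_information", [("knowledge_local", 2)]),
    ("handle_animal", [("knowledge_nature", 2)]),
    ("turn_undead", [("knowledge_religion", 2)]),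
    ("knowledge_nature", [("survival", 2)]),
    ("balance", [("tumble", 2)]),
    ("jump", [("tumble", 2)]),
    ("use_magic_device", [("spellcraft", 2)]),
    ("climb", [("use_rope", 2)]),
    ("escape_artist", [("use_rope", 2)]) ]

-- _REVERSE_SYNERGIES.get(k, []): first-match lookup with default []
def pvRevGet (d : List (String × List (String × Int))) (k : String) : List (String × Int) :=
  match d with
  | [] => []
  | p :: rest => if p.1 == k then p.2 else pvRevGet rest k

def get_synergy_bonus_py_alt (actor_ranks : List (String × Int)) (target_skill_id : String) : Int :=
  (pvRevGet pvRevTable target_skill_id).foldl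
    (fun t q => if 5 ≤ pvRankGet actor_ranks q.1 then t + q.2 else t) 0

-- ===== PRECONDITION & SPEC =====
def Spec_get_synergy_bonus_py (actor_ranks : List (String × Int)) (target_skill_id : String) (out : Int) : Prop := out = get_synergy_bonus_py_alt actor_ranks target_skill_id
instance (actor_ranks : List (String × Int)) (target_skill_id : String) (out : Int) : Decidable (Spec_get_synergy_bonus_py actor_ranks target_skill_id out) := by unfold Spec_get_synergy_bonus_py; infer_instance

-- ===== CLAIM (what is proved, stated in full; the proofs are below) =====
def Claim_equal_get_synergy_bonus_py : Prop := ∀ (actor_ranks : List (String × Int)) (target_skill_id : String), Dom_get_synergy_bonus_py actor_ranks target_skill_id → Spec_get_synergy_bonus_py actor_ranks target_skill_id (get_synergy_bonus_py actor_ranks target_skill_id)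

-- ===== LEMMAS AND PROOFS =====

-- ===== VERDICT (by name: the statement is the Claim_ definition above) =====
theorem get_synergy_bonus_py_spec : Claim_equal_get_synergy_bonus_py := by
  intro ranks tid _
  unfold Spec_get_synergy_bonus_py get_synergy_bonus_py get_synergy_bonus_py_alt
  by_cases h1 : ("disguise" : String) = tid
  · subst h1; simp [pvSynTable, pvRevTable, pvRevGet]
  by_cases h2 : ("diplomacy" : String) = tid
  · subst h2; simp [pvSynTable, pvRevTable, pvRevGet]
  by_cases h3 : ("intimidate" : String) = tid
  · subst h3; simp [pvSynTable, pvRevTable, pvRevGet]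
  by_cases h4 : ("sleight_of_hand" : String) = tid
  · subst h4; simp [pvSynTable, pvRevTable, pvRevGet]
  by_cases h5 : ("use_rope" : String) = tid
  · subst h5; simp [pvSynTable, pvRevTable, pvRevGet]
  by_cases h6 : ("ride" : String) = tid
  · subst h6; simp [pvSynTable, pvRevTable, pvRevGet]
  by_cases h7 : ("wild_empathy" : String) = tid
  · subst h7; simp [pvSynTable, pvRevTable, pvRevGet]
  by_cases h8 : ("tumble" : String) = tid
  · subst h8; simp [pvSynTable, pvRevTable, pvRevGet]
  by_cases h9 : ("spellcraft" : String) = tid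
  · subst h9; simp [pvSynTable, pvRevTable, pvRevGet]
  by_cases h10 : ("search" : String) = tid
  · subst h10; simp [pvSynTable, pvRevTable, pvRevGet]
  by_cases h11 : ("survival" : String) = tid
  · subst h11; simp [pvSynTable, pvRevTable, pvRevGet]
  by_cases h12 : ("navigate" : String) = tid
  · subst h12; simp [pvSynTable, pvRevTable, pvRevGet]
  by_cases h13 : ("bardic_knowledge" : String) = tid
  · subst h13; simp [pvSynTable, pvRevTable, pvRevGet]
  by_cases h14 : ("gather_information" : String) = tid
  · subst h14; simp [pvSynTable, pvRevTable, pvRevGet]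
  by_cases h15 : ("handle_animal" : String) = tid
  · subst h15; simp [pvSynTable, pvRevTable, pvRevGet]
  by_cases h16 : ("turn_undead" : String) = tid
  · subst h16; simp [pvSynTable, pvRevTable, pvRevGet]
  by_cases h17 : ("knowledge_nature" : String) = tid
  · subst h17; simp [pvSynTable, pvRevTable, pvRevGet]
  by_cases h18 : ("balance" : String) = tid
  · subst h18; simp [pvSynTable, pvRevTable, pvRevGet]
  by_cases h19 : ("jump" : String) = tid
  · subst h19; simp [pvSynTable, pvRevTable, pvRevGet]
  by_cases h20 : ("use_magic_device" : String) = tid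
  · subst h20; simp [pvSynTable, pvRevTable, pvRevGet]
  by_cases h21 : ("climb" : String) = tid
  · subst h21; simp [pvSynTable, pvRevTable, pvRevGet]
  by_cases h22 : ("escape_artist" : String) = tid
  · subst h22; simp [pvSynTable, pvRevTable, pvRevGet]
  simp [pvSynTable, pvRevTable, pvRevGet, beq_iff_eq, h1, h2, h3, h4, h5, h6, h7, h8, h9, h10, h11, h12, h13, h14, h15, h16, h17, h18, h19, h20, h21, h22]
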